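-- pv_equiv track=rewrite | github.com/open-event-hub/title2event_baselines | seqtag/ner_task_config.py | split_trg_tags
-- ===== SOURCE A (Python) =====
-- def split_trg_tags(trg_tags):
--     splited_tags = []
--     if trg_tags:
--         for i in range(1,7):
--             tags = None
--             if f'B-T{i}' in trg_tags or f'I-T{i}' in trg_tags:
--                 tags = [tag if str(i) in tag else "O" for tag in trg_tags]
--             splited_tags.append(tags)
--     if splited_tags == [None]*6: # if do argument extraction based on predicted triggers, and there's no predicted trigger for this instance, should at least keep one trg_tags so that this instance is not lost
--         splited_tags[0] = trg_tags
--     return splited_tags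
-- ===== SOURCE B (Python) =====
-- def split_trg_tags(trg_tags):
--     if not trg_tags:
--         return []
--     cols = [[], [], [], [], [], []]
--     present = set()
--     for tag in trg_tags:
--         for i in range(1, 7):
--             cols[i-1].append(tag if str(i) in tag else "O")
--             if tag == f'B-T{i}' or tag == f'I-T{i}':
--                 present.add(i)
--     splited = [cols[i-1] if i in present else None for i in range(1, 7)]
--     if all(s is None for s in splited):
--         splited[0] = trg_tags
--     return splited
-- ===== Notes on version B (the rewrite author's own statement) =====
-- stated objective: alternative
-- what changed: Replaces A's six passes (each with two full membership scans plus a full comprehension over trg_tags) by a single transposing pass that scatters every tag into all six columns at once while collecting the set of trigger indices actually present.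
import Mathlib
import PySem

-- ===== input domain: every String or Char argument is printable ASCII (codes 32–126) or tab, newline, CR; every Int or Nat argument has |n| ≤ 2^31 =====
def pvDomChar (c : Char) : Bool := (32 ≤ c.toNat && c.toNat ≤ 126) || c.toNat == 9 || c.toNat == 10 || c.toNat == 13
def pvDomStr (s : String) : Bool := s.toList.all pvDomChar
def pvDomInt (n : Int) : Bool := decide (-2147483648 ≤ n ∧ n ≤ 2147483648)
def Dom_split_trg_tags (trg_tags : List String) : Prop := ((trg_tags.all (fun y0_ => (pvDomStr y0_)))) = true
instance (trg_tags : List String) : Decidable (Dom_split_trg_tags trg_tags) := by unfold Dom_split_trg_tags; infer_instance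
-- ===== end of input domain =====

-- B replaces A's six membership scans and six full comprehensions by one transposing pass
-- that scatters each tag into all six columns at once (objective: alternative decomposition).

-- ===== PORT A =====
def split_trg_tags (trg_tags : List String) : List (Option (List String)) :=
  let splited_tags : List (Option (List String)) := []
  let splited_tags :=
    if trg_tags ≠ [] then
      (PySem.List.pyRange 1 7 1).foldl (fun acc i =>
        let tags : Option (List String) :=
          if trg_tags.contains ("B-T" ++ PySem.Int.toStr i)
              || trg_tags.contains ("I-T" ++ PySem.Int.toStr i) then
            some (trg_tags.map (fun tag =>
              if PySem.Str.isIn (PySem.Int.toStr i) tag then tag else "O"))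
          else none
        acc ++ [tags]) splited_tags
    else splited_tags
  if splited_tags = List.replicate 6 none then
    splited_tags.set 0 (some trg_tags)
  else splited_tags

-- ===== PORT B =====
def split_trg_tags_alt (trg_tags : List String) : List (Option (List String)) :=
  if trg_tags = [] then []
  else
    let st := trg_tags.foldl (fun (st : List (List String) × PySem.Set Int) tag =>
        (PySem.List.pyRange 1 7 1).foldl (fun st i =>
          let cols := st.1.modify (i - 1).toNat (fun c =>
            c ++ [if PySem.Str.isIn (PySem.Int.toStr i) tag then tag else "O"])
          let present :=
            if tag == "B-T" ++ PySem.Int.toStr i || tag == "I-T" ++ PySem.Int.toStr i then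
              st.2.add i
            else st.2
          (cols, present)) st)
      (([[], [], [], [], [], []], PySem.Set.empty) : List (List String) × PySem.Set Int)
    let splited := (PySem.List.pyRange 1 7 1).map (fun i =>
      if st.2.contains i then some (PySem.List.pyGetD st.1 (i - 1) []) else none)
    if splited.all (·.isNone) then splited.set 0 (some trg_tags) else splited

-- ===== PRECONDITION & SPEC =====
def Spec_split_trg_tags (trg_tags : List String) (out : List (Option (List String))) : Prop := out = split_trg_tags_alt trg_tags
instance (trg_tags : List String) (out : List (Option (List String))) : Decidable (Spec_split_trg_tags trg_tags out) := by unfold Spec_split_trg_tags; infer_instance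

-- ===== CLAIM (what is proved, stated in full; the proofs are below) =====
def Claim_equal_split_trg_tags : Prop := ∀ (trg_tags : List String), Dom_split_trg_tags trg_tags → Spec_split_trg_tags trg_tags (split_trg_tags trg_tags)

-- ===== LEMMAS AND PROOFS =====

-- the i-th output column: each tag kept when str(i) occurs in it, else "O"
def pvCol (ts : List String) (i : Int) : List String :=
  ts.map (fun tag => if PySem.Str.isIn (PySem.Int.toStr i) tag then tag else "O")

-- the present-set update performed for one tag (the second component of B's inner loop)
def pvPStep (p : PySem.Set Int) (tag : String) : PySem.Set Int :=
  (PySem.List.pyRange 1 7 1).foldl (fun p i =>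
    if tag == "B-T" ++ PySem.Int.toStr i || tag == "I-T" ++ PySem.Int.toStr i then
      p.add i
    else p) p

theorem pvRange16 : PySem.List.pyRange 1 7 1 = [1, 2, 3, 4, 5, 6] := by decide

theorem contains_or_any (ts : List String) (c1 c2 : String) :
    (ts.contains c1 || ts.contains c2) = ts.any (fun t => t == c1 || t == c2) := by
  induction ts with
  | nil => rfl
  | cons h t ih =>
    simp only [List.any_cons, ← ih, List.contains_cons, BEq.comm (b := h)]
    cases h == c1 <;> cases h == c2 <;> cases t.contains c1 <;> cases t.contains c2 <;> rfl

-- one step of B's outer loop, on a six-element column state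
theorem bstep_eq (tag : String) (a b c d e f : List String) (p : PySem.Set Int) :
    (PySem.List.pyRange 1 7 1).foldl (fun st (i : Int) =>
        let cols := st.1.modify (i - 1).toNat (fun col =>
          col ++ [if PySem.Str.isIn (PySem.Int.toStr i) tag then tag else "O"])
        let present :=
          if tag == "B-T" ++ PySem.Int.toStr i || tag == "I-T" ++ PySem.Int.toStr i then
            st.2.add i
          else st.2
        (cols, present)) (([a, b, c, d, e, f], p) : List (List String) × PySem.Set Int)
    = ([a ++ [if PySem.Str.isIn (PySem.Int.toStr 1) tag then tag else "O"],
        b ++ [if PySem.Str.isIn (PySem.Int.toStr 2) tag then tag else "O"],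
        c ++ [if PySem.Str.isIn (PySem.Int.toStr 3) tag then tag else "O"],
        d ++ [if PySem.Str.isIn (PySem.Int.toStr 4) tag then tag else "O"],
        e ++ [if PySem.Str.isIn (PySem.Int.toStr 5) tag then tag else "O"],
        f ++ [if PySem.Str.isIn (PySem.Int.toStr 6) tag then tag else "O"]],
       pvPStep p tag) := by
  rw [pvRange16]
  simp only [pvPStep, pvRange16, List.foldl]
  rfl

-- B's outer loop, fully characterised
theorem bfold (ts : List String) (a b c d e f : List String) (p : PySem.Set Int) :
    ts.foldl (fun (st : List (List String) × PySem.Set Int) tag =>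
        (PySem.List.pyRange 1 7 1).foldl (fun st (i : Int) =>
          let cols := st.1.modify (i - 1).toNat (fun col =>
            col ++ [if PySem.Str.isIn (PySem.Int.toStr i) tag then tag else "O"])
          let present :=
            if tag == "B-T" ++ PySem.Int.toStr i || tag == "I-T" ++ PySem.Int.toStr i then
              st.2.add i
            else st.2
          (cols, present)) st) ([a, b, c, d, e, f], p)
    = ([a ++ pvCol ts 1, b ++ pvCol ts 2, c ++ pvCol ts 3,
        d ++ pvCol ts 4, e ++ pvCol ts 5, f ++ pvCol ts 6],
       ts.foldl pvPStep p) := by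
  induction ts generalizing a b c d e f p with
  | nil => simp [pvCol]
  | cons tag ts ih =>
    rw [List.foldl_cons, bstep_eq, ih, List.foldl_cons]
    simp [pvCol, List.append_assoc]

theorem contains_ite (c : Prop) [Decidable c] (s : PySem.Set Int) (x y : Int) :
    (if c then PySem.Set.add s x else s).contains y = (decide c && (y == x) || s.contains y) := by
  have h1 := PySem.Set.contains_iff (PySem.Set.add s x) y
  have h2 := PySem.Set.contains_iff s y
  split_ifs with h <;> rcases Bool.eq_false_or_eq_true (s.contains y) with hc | hc <;>
    by_cases hx : y = x <;> simp_all [PySem.Set.mem_add]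

theorem pstep_contains (p : PySem.Set Int) (tag : String) (i : Int)
    (h1 : 1 ≤ i) (h6 : i ≤ 6) :
    (pvPStep p tag).contains i
      = (p.contains i
          || (tag == "B-T" ++ PySem.Int.toStr i || tag == "I-T" ++ PySem.Int.toStr i)) := by
  interval_cases i <;>
    · simp only [pvPStep, pvRange16, List.foldl, contains_ite]
      cases hp : p.contains _ <;> simp <;> rfl

theorem pfold_contains (ts : List String) (p : PySem.Set Int) (i : Int)
    (h1 : 1 ≤ i) (h6 : i ≤ 6) :
    (ts.foldl pvPStep p).contains i
      = (p.contains i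
          || ts.any (fun tag =>
              tag == "B-T" ++ PySem.Int.toStr i || tag == "I-T" ++ PySem.Int.toStr i)) := by
  induction ts generalizing p with
  | nil => simp
  | cons tag ts ih =>
    rw [List.foldl_cons, ih, pstep_contains p tag i h1 h6, List.any_cons]
    cases p.contains i <;> simp [Bool.or_assoc]

theorem pyGetD6_1 (a b c d e f : List String) : PySem.List.pyGetD [a, b, c, d, e, f] (1 - 1) [] = a := rfl
theorem pyGetD6_2 (a b c d e f : List String) : PySem.List.pyGetD [a, b, c, d, e, f] (2 - 1) [] = b := rfl
theorem pyGetD6_3 (a b c d e f : List String) : PySem.List.pyGetD [a, b, c, d, e, f] (3 - 1) [] = c := rfl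
theorem pyGetD6_4 (a b c d e f : List String) : PySem.List.pyGetD [a, b, c, d, e, f] (4 - 1) [] = d := rfl
theorem pyGetD6_5 (a b c d e f : List String) : PySem.List.pyGetD [a, b, c, d, e, f] (5 - 1) [] = e := rfl
theorem pyGetD6_6 (a b c d e f : List String) : PySem.List.pyGetD [a, b, c, d, e, f] (6 - 1) [] = f := rfl

theorem all_none_iff (e1 e2 e3 e4 e5 e6 : Option (List String)) :
    ([e1, e2, e3, e4, e5, e6] = List.replicate 6 none)
      ↔ ([e1, e2, e3, e4, e5, e6].all (·.isNone) = true) := by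
  simp [List.replicate, Option.isNone_iff_eq_none]

-- ===== VERDICT (by name: the statement is the Claim_ definition above) =====
theorem split_trg_tags_spec : Claim_equal_split_trg_tags := by
  intro ts _
  unfold Spec_split_trg_tags
  by_cases hts : ts = []
  · subst hts; decide
  · unfold split_trg_tags split_trg_tags_alt
    simp only [hts, if_neg, ne_eq, not_false_eq_true, if_true, if_false, ite_false, ite_true]
    rw [bfold]
    rw [pvRange16]
    simp only [List.foldl, List.map, List.nil_append]
    rw [pfold_contains ts PySem.Set.empty 1 (by norm_num) (by norm_num),
        pfold_contains ts PySem.Set.empty 2 (by norm_num) (by norm_num),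
        pfold_contains ts PySem.Set.empty 3 (by norm_num) (by norm_num),
        pfold_contains ts PySem.Set.empty 4 (by norm_num) (by norm_num),
        pfold_contains ts PySem.Set.empty 5 (by norm_num) (by norm_num),
        pfold_contains ts PySem.Set.empty 6 (by norm_num) (by norm_num)]
    simp only [PySem.Set.empty, List.contains_nil, Bool.false_or]
    rw [← contains_or_any, ← contains_or_any, ← contains_or_any,
        ← contains_or_any, ← contains_or_any, ← contains_or_any]
    simp only [pvCol, PySem.Set.contains_eq_listContains, List.contains_nil, Bool.false_or,
      pyGetD6_1, pyGetD6_2, pyGetD6_3, pyGetD6_4, pyGetD6_5, pyGetD6_6,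
      List.append_assoc, List.singleton_append, List.cons_append, List.nil_append]
    rw [if_congr (all_none_iff _ _ _ _ _ _) rfl rfl]
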